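-- pv_equiv track=rewrite | github.com/hariomahlawat/An-open-dataset-for-landuse-classification-in-India-for-Sentinel-2 | temporal_correction.py | Detect_inconsistency_pattern
-- ===== SOURCE A (Python) =====
-- Green=1
--
-- Water=2
--
-- Builtup=3
--
-- Barrenland=4
--
-- def Detect_inconsistency_pattern(pixelVals):
--     # A pixel detected as builtup all years is consistent
--     if all(val == Builtup for val in pixelVals):
--         return 0
--
--     # A pixel detected as non-builtup all years is consistent
--     if not any(val == Builtup for val in pixelVals):
--         return 0
--
--     # find the first time a pixel was detected as Builtup
--     for i in range(len(pixelVals)):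
--         if pixelVals[i] == Builtup :
--             Builtupfirstindex = i
--             break
--
--     #If a pixel once predicted as builtup is predicted as builtup for further years, it is consistent
--     if all(val == Builtup for val in pixelVals[Builtupfirstindex:]):
--         return 0
--
--     ##### At this point all consistent patterns are determined #####
--     ##### Now pixelVals holds atleast one builtup prediction followed by non-builup predictions and is therefore inconsistent #####
--
--     # If all land cover classes are detected
--     if(Green in pixelVals) and (Water in pixelVals) and (Barrenland in pixelVals):
--         return 1
--
--     # If predictions are a mix of builup, water, and green
--     if(Green in pixelVals) and (Water in pixelVals):
--         return 2
--
--     # If predictions are a mix of builup, water, and barrenland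
--     if(Water in pixelVals) and (Barrenland in pixelVals):
--         return 3
--
--     # If predictions are a mix of builup, green, and barrenland
--     if(Green in pixelVals) and (Barrenland in pixelVals):
--         return 4
--
--     # If predictions are a mix of builup, and green
--     if(Green in pixelVals):
--         return 5
--
--     # If predictions are a mix of builup, and water
--     if(Water in pixelVals):
--         return 6
--
--     # If predictions are a mix of builup, and barrenland
--     if(Barrenland in pixelVals):
--         return 7
-- ===== SOURCE B (Python) =====
-- Green = 1
-- Water = 2
-- Builtup = 3
-- Barrenland = 4
--
-- _PATTERN_CODE = {
--     (True, True, True): 1,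
--     (True, True, False): 2,
--     (False, True, True): 3,
--     (True, False, True): 4,
--     (True, False, False): 5,
--     (False, True, False): 6,
--     (False, False, True): 7,
-- }
--
-- def Detect_inconsistency_pattern(pixelVals):
--     # One pass: record which classes appear and whether a non-Builtup
--     # prediction follows a Builtup one; then a table lookup.
--     green = water = barren = builtup = mixed_after = False
--     for v in pixelVals:
--         if v == Builtup:
--             builtup = True
--         else:
--             if builtup:
--                 mixed_after = True
--             if v == Green:
--                 green = True
--             elif v == Water:
--                 water = True
--             elif v == Barrenland:
--                 barren = True
--     if not builtup or not mixed_after: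
--         return 0
--     return _PATTERN_CODE[(green, water, barren)]
-- ===== Notes on version B (the rewrite author's own statement) =====
-- stated objective: alternative
-- what changed: Replaces A's repeated scans (all/any, an index-finding loop, a slice re-scan, and seven membership tests in an if-ladder) with a single pass that tracks class-presence booleans and a 'non-Builtup-after-Builtup' flag, then a table lookup keyed by the (Green,Water,Barrenland) presence triple.
-- outside the precondition, e.g. on Detect_inconsistency_pattern([3, 5]): A returns None, B raises KeyError
import Mathlib
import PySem

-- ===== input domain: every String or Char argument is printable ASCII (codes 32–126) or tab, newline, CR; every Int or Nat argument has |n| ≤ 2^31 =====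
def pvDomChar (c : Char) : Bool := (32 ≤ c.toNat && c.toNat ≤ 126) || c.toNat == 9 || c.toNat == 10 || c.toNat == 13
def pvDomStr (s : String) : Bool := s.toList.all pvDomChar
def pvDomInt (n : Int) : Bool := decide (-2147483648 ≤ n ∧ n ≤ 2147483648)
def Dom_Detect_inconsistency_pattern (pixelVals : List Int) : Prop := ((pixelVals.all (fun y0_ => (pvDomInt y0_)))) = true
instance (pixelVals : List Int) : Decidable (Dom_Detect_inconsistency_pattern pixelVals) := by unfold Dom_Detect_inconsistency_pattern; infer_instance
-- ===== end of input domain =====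

-- B replaces A's several scans and seven-branch ladder by one pass that tracks
-- presence booleans plus a "non-Builtup after Builtup" flag, then a table lookup
-- keyed by the (Green, Water, Barrenland) presence triple (objective: alternative).

-- ===== PORT A =====
-- the 'for i in range(len(pixelVals)): if pixelVals[i] == Builtup: ...; break' loop
def firstBuiltupA : List Int → Nat
  | [] => 0                                   -- loop ends without break (unreachable: a Builtup exists here)
  | v :: t => if v == 3 then 0 else firstBuiltupA t + 1

def Detect_inconsistency_pattern (pixelVals : List Int) : Int :=
  if pixelVals.all (fun v => v == 3) then 0
  else if !(pixelVals.any (fun v => v == 3)) then 0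
  else
    let builtupfirstindex : Nat := firstBuiltupA pixelVals
    if (PySem.List.slice pixelVals (some (builtupfirstindex : Int)) none).all (fun v => v == 3) then 0
    else if pixelVals.contains 1 && pixelVals.contains 2 && pixelVals.contains 4 then 1
    else if pixelVals.contains 1 && pixelVals.contains 2 then 2
    else if pixelVals.contains 2 && pixelVals.contains 4 then 3
    else if pixelVals.contains 1 && pixelVals.contains 4 then 4
    else if pixelVals.contains 1 then 5
    else if pixelVals.contains 2 then 6
    else if pixelVals.contains 4 then 7
    else 0                                    -- Python falls off the end and returns None; excluded by Pre_

-- ===== PORT B =====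
-- state: (green, water, barren, builtup, mixed_after)
def altStep (st : Bool × Bool × Bool × Bool × Bool) (v : Int) : Bool × Bool × Bool × Bool × Bool :=
  match st with
  | (g, w, br, bu, mx) =>
    if v == 3 then (g, w, br, true, mx)
    else
      let mx := mx || bu
      if v == 1 then (true, w, br, bu, mx)
      else if v == 2 then (g, true, br, bu, mx)
      else if v == 4 then (g, w, true, bu, mx)
      else (g, w, br, bu, mx)

def patternCode : PySem.Dict (Bool × Bool × Bool) Int :=
  PySem.Dict.ofList
    [((true, true, true), 1), ((true, true, false), 2), ((false, true, true), 3),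
     ((true, false, true), 4), ((true, false, false), 5), ((false, true, false), 6),
     ((false, false, true), 7)]

def Detect_inconsistency_pattern_alt (pixelVals : List Int) : Int :=
  match pixelVals.foldl altStep (false, false, false, false, false) with
  | (g, w, br, bu, mx) =>
    if !bu || !mx then 0
    else (patternCode.get? (g, w, br)).getD 0   -- Python raises KeyError on the missing (F,F,F) key; excluded by Pre_

-- ===== PRECONDITION & SPEC =====
-- Pre_ excludes exactly the inputs on which Python A falls off the end and returns None (not an int):
-- a Builtup (3) followed later by some non-Builtup value while none of the classes 1, 2, 4 occurs;
-- Python B raises KeyError there.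
def Pre_Detect_inconsistency_pattern (pixelVals : List Int) : Prop :=
  ((3:Int) ∈ pixelVals ∧ (1:Int) ∉ pixelVals ∧ (2:Int) ∉ pixelVals ∧ (4:Int) ∉ pixelVals) →
  ∀ i ∈ List.range pixelVals.length, ∀ j ∈ List.range pixelVals.length,
    i < j → pixelVals.getD i 0 = 3 → pixelVals.getD j 0 = 3
instance (pixelVals : List Int) : Decidable (Pre_Detect_inconsistency_pattern pixelVals) := by
  unfold Pre_Detect_inconsistency_pattern; infer_instance

def pvWitness_Detect_inconsistency_pattern : List Int := [3, 1, 2]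

def Spec_Detect_inconsistency_pattern (pixelVals : List Int) (out : Int) : Prop := out = Detect_inconsistency_pattern_alt pixelVals
instance (pixelVals : List Int) (out : Int) : Decidable (Spec_Detect_inconsistency_pattern pixelVals out) := by unfold Spec_Detect_inconsistency_pattern; infer_instance

-- ===== CLAIM (what is proved, stated in full; the proofs are below) =====
def Claim_equal_Detect_inconsistency_pattern : Prop := ∀ (pixelVals : List Int), Dom_Detect_inconsistency_pattern pixelVals → Pre_Detect_inconsistency_pattern pixelVals → Spec_Detect_inconsistency_pattern pixelVals (Detect_inconsistency_pattern pixelVals)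

-- ===== LEMMAS AND PROOFS =====

-- whether a non-Builtup value occurs strictly after some Builtup value
def mixedFrom : List Int → Bool
  | [] => false
  | v :: t => if v == 3 then t.any (fun u => !(u == 3)) else mixedFrom t

lemma mixedFrom_imp_any {t : List Int} (h : mixedFrom t = true) :
    t.any (fun u => !(u == 3)) = true := by
  induction t with
  | nil => simp [mixedFrom] at h
  | cons v t ih =>
    by_cases hv : v = 3
    · simp [mixedFrom, hv] at h; simp [h]
    · simp [mixedFrom, hv] at h
      simp [ih h]

lemma foldB (xs : List Int) (g w br bu mx : Bool) :
    xs.foldl altStep (g, w, br, bu, mx) =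
      (g || xs.contains 1, w || xs.contains 2, br || xs.contains 4, bu || xs.contains 3,
       mx || (bu && xs.any (fun u => !(u == 3))) || mixedFrom xs) := by
  induction xs generalizing g w br bu mx with
  | nil => simp [mixedFrom]
  | cons v t ih =>
    by_cases hv : v = 3
    · simp only [List.foldl_cons, altStep, hv]
      simp only [beq_self_eq_true, if_true, ih]
      have hany := @mixedFrom_imp_any t
      simp only [Prod.mk.injEq]
      refine ⟨by simp, by simp, by simp, by simp, ?_⟩
      by_cases h : mixedFrom t = true
      · have ht := hany h
        cases bu <;> cases mx <;> simp [mixedFrom, h, ht]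
      · have h' : mixedFrom t = false := by simpa using h
        cases bu <;> cases mx <;> cases ht : (t.any fun u => !(u == 3)) <;>
          simp [mixedFrom, h', ht]
    · simp only [List.foldl_cons, altStep]
      rw [if_neg (by simpa using hv)]
      by_cases h1 : v = 1
      · subst h1
        simp only [ih]
        simp [mixedFrom, Bool.or_assoc, Bool.or_comm, Bool.or_left_comm]
        cases bu <;> simp
      · by_cases h2 : v = 2
        · subst h2
          simp only [ih]
          simp [mixedFrom, Bool.or_assoc, Bool.or_comm, Bool.or_left_comm]
          cases bu <;> simp
        · by_cases h4 : v = 4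
          · subst h4
            simp only [ih]
            simp [mixedFrom, Bool.or_assoc, Bool.or_comm, Bool.or_left_comm]
            cases bu <;> simp
          · rw [if_neg (by simpa using h1), if_neg (by simpa using h2), if_neg (by simpa using h4)]
            simp only [ih]
            have e1 : ((1:Int) = v) = False := eq_false fun h => h1 h.symm
            have e2 : ((2:Int) = v) = False := eq_false fun h => h2 h.symm
            have e3 : ((3:Int) = v) = False := eq_false fun h => hv h.symm
            have e4 : ((4:Int) = v) = False := eq_false fun h => h4 h.symm
            simp [mixedFrom, hv, e1, e2, e3, e4]
            cases bu <;> simp [hv]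

lemma drop_firstBuiltupA_all (xs : List Int) (h : (3:Int) ∈ xs) :
    (xs.drop (firstBuiltupA xs)).all (fun v => v == 3) = !(mixedFrom xs) := by
  induction xs with
  | nil => simp at h
  | cons v t ih =>
    by_cases hv : v = 3
    · simp [firstBuiltupA, hv, mixedFrom, List.all_eq_not_any_not]
    · have ht : (3:Int) ∈ t := by
        rcases List.mem_cons.mp h with h' | h'
        · exact absurd h'.symm hv
        · exact h'
      simp [firstBuiltupA, hv, mixedFrom, ih ht]

lemma mixedFrom_exists {xs : List Int} (h : mixedFrom xs = true) :
    ∃ i j, i < j ∧ j < xs.length ∧ xs.getD i 0 = 3 ∧ xs.getD j 0 ≠ 3 := by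
  induction xs with
  | nil => simp [mixedFrom] at h
  | cons v t ih =>
    by_cases hv : v = 3
    · simp only [mixedFrom, hv, beq_self_eq_true, if_true] at h
      rw [List.any_eq_true] at h
      obtain ⟨u, hu, hne⟩ := h
      obtain ⟨k, hk, hku⟩ := List.mem_iff_getElem.mp hu
      refine ⟨0, k + 1, by omega, by simp; omega, by simp [hv], ?_⟩
      have : (v :: t).getD (k + 1) 0 = t.getD k 0 := by simp
      rw [this, List.getD_eq_getElem t 0 hk, hku]
      simpa using hne
    · simp only [mixedFrom] at h
      rw [if_neg (by simpa using hv)] at h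
      obtain ⟨i, j, hij, hj, hi3, hj3⟩ := ih h
      exact ⟨i + 1, j + 1, by omega, by simp; omega, by simpa using hi3, by simpa using hj3⟩

lemma contains_eq_any (xs : List Int) (c : Int) :
    xs.any (fun v => v == c) = xs.contains c := by
  induction xs with
  | nil => rfl
  | cons v t ih =>
    simp only [List.any_cons, List.contains_cons, ih]
    by_cases h : c = v
    · simp [h]
    · have hvc : (v == c) = false := beq_eq_false_iff_ne.mpr fun hh => h hh.symm
      have hcv : (c == v) = false := beq_eq_false_iff_ne.mpr h
      simp [hvc, hcv]

-- ===== VERDICT (by name: the statement is the Claim_ definition above) =====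
theorem Detect_inconsistency_pattern_spec : Claim_equal_Detect_inconsistency_pattern := by
  intro xs _ hpre
  unfold Spec_Detect_inconsistency_pattern
  unfold Detect_inconsistency_pattern Detect_inconsistency_pattern_alt
  rw [foldB]
  simp only [Bool.false_or, Bool.false_and]
  by_cases hall : xs.all (fun v => v == 3) = true
  · -- all Builtup: both 0 (mixedFrom is false since nothing differs from 3)
    have hmx : mixedFrom xs = false := by
      cases h : mixedFrom xs
      · rfl
      · have := mixedFrom_imp_any h
        rw [List.any_eq_true] at this
        obtain ⟨u, hu, hne⟩ := this
        have := List.all_eq_true.mp hall u hu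
        simp_all
    simp [hall, hmx]
  · rw [if_neg hall]
    by_cases hc3 : xs.contains 3 = true
    · -- some Builtup present, not all
      have hany : xs.any (fun v => v == 3) = true := by rw [contains_eq_any]; exact hc3
      rw [hany]
      simp only [Bool.not_true, Bool.false_eq_true, if_false]
      have hmem3 : (3:Int) ∈ xs := by simpa using hc3
      have hslice : PySem.List.slice xs (some ((firstBuiltupA xs : Nat) : Int)) none
          = xs.drop (firstBuiltupA xs) := PySem.List.slice_from_natCast xs _
      rw [hslice, drop_firstBuiltupA_all xs hmem3]
      cases hmx : mixedFrom xs
      · simp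
      · -- inconsistent case: the ladder equals the table lookup
        simp only [Bool.not_true, Bool.false_eq_true, if_false, hc3, Bool.or_false]
        have hnot : ¬ ((1:Int) ∉ xs ∧ (2:Int) ∉ xs ∧ (4:Int) ∉ xs) := by
          intro ⟨h1, h2, h4⟩
          obtain ⟨i, j, hij, hj, hi3, hj3⟩ := mixedFrom_exists hmx
          exact hj3 (hpre ⟨hmem3, h1, h2, h4⟩ i (by simp; omega) j (by simpa using hj) hij hi3)
        by_cases h1 : xs.contains 1 = true <;> by_cases h2 : xs.contains 2 = true <;>
          by_cases h4 : xs.contains 4 = true <;>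
          simp_all [patternCode, PySem.Dict.ofList, List.contains_eq_mem] <;> decide
    · -- no Builtup at all: both 0
      have hc3' : xs.contains 3 = false := by simpa using hc3
      have hany : xs.any (fun v => v == 3) = false := by
        rw [contains_eq_any]; exact hc3'
      have hmem : (3:Int) ∉ xs := by simpa using hc3'
      simp [hany, hmem]
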